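-- pv_equiv track=rewrite | github.com/Roberto09/ParHL | lexer_parser/structs/tensor_shape_utils.py | squeeze
-- ===== SOURCE A (Python) =====
-- from typing import List, TypeVar, Union
--
-- def maybe_wrap_dim(dim: int, dim_post_expr: int, wrap_scalar: bool = True):
--     if dim_post_expr <= 0:
--         assert wrap_scalar
--         dim_post_expr = 1
--     min = -dim_post_expr
--     max = dim_post_expr - 1
--     assert not (dim < min or dim > max)
--     if dim < 0:
--         dim += dim_post_expr
--     return dim
--
-- def squeeze(li: List[int], dim: int):
--     out: List[int] = []
--     wrapped_dim = maybe_wrap_dim(dim, len(li))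
--     for i in range(len(li)):
--         if i == wrapped_dim:
--             if li[i] != 1:
--                 out.append(li[i])
--         else:
--             out.append(li[i])
--     return out
-- ===== SOURCE B (Python) =====
-- from typing import List
--
-- def maybe_wrap_dim(dim: int, dim_post_expr: int, wrap_scalar: bool = True):
--     if dim_post_expr <= 0:
--         assert wrap_scalar
--         dim_post_expr = 1
--     min = -dim_post_expr
--     max = dim_post_expr - 1
--     assert not (dim < min or dim > max)
--     if dim < 0:
--         dim += dim_post_expr
--     return dim
--
-- def squeeze(li: List[int], dim: int):
--     w = maybe_wrap_dim(dim, len(li))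
--     if w < len(li) and li[w] == 1:
--         return li[:w] + li[w + 1:]
--     return li[:]
-- ===== Notes on version B (the rewrite author's own statement) =====
-- stated objective: simpler
-- what changed: Replaced the element-by-element loop that rebuilds the list while testing each index against the wrapped dimension by a single slicing decision: if the wrapped dimension is in range and that entry is 1, return li[:w] + li[w+1:], else a fresh copy of li.
import Mathlib
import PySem

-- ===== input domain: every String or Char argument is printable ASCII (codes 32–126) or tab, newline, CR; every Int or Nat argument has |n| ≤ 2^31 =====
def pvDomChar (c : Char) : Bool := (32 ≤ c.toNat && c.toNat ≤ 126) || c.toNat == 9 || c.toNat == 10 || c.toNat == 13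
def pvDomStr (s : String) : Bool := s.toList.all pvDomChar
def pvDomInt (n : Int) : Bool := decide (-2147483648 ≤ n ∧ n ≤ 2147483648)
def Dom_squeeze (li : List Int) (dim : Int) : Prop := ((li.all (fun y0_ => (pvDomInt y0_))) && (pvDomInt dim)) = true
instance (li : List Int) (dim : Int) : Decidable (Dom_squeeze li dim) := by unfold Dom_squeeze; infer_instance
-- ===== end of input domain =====

-- B replaces A's index loop by one slicing decision (li[:w] + li[w+1:] vs a plain copy); objective: simpler.

-- ===== PORT A =====
-- shared helper: literal port of maybe_wrap_dim (its asserts raise exactly outside Pre_squeeze, which excludes those inputs)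
def maybeWrapDim (dim : Int) (dimPostExpr : Int) : Int :=
  let dpe := if dimPostExpr ≤ 0 then 1 else dimPostExpr
  if dim < 0 then dim + dpe else dim

def squeeze (li : List Int) (dim : Int) : List Int :=
  let w := maybeWrapDim dim (li.length : Int)
  (PySem.List.pyRange 0 (li.length : Int) 1).foldl
    (fun out i =>
      if i == w then
        if PySem.List.pyGetD li i 0 ≠ 1 then out ++ [PySem.List.pyGetD li i 0] else out
      else out ++ [PySem.List.pyGetD li i 0]) []
    -- li[i] with 0 ≤ i < len(li): pyGetD is exact here (index always in range)

-- ===== PORT B =====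
def squeeze_alt (li : List Int) (dim : Int) : List Int :=
  let w := maybeWrapDim dim (li.length : Int)
  if w < (li.length : Int) ∧ PySem.List.pyGetD li w 0 = 1 then
    -- li[w] is in range whenever this branch's index test holds under Pre_squeeze
    PySem.List.slice li none (some w) ++ PySem.List.slice li (some (w + 1)) none
  else
    PySem.List.slice li none none

-- ===== PRECONDITION & SPEC =====
-- Pre_ excludes exactly the inputs where maybe_wrap_dim's assert raises AssertionError:
-- dim must lie in [-n, n-1] where n = max(len(li), 1).
def Pre_squeeze (li : List Int) (dim : Int) : Prop :=
  -(max (li.length : Int) 1) ≤ dim ∧ dim ≤ max (li.length : Int) 1 - 1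
instance (li : List Int) (dim : Int) : Decidable (Pre_squeeze li dim) := by
  unfold Pre_squeeze; infer_instance
def pvWitness_squeeze : List Int × Int := ([2, 1, 3], 1)

def Spec_squeeze (li : List Int) (dim : Int) (out : List Int) : Prop := out = squeeze_alt li dim
instance (li : List Int) (dim : Int) (out : List Int) : Decidable (Spec_squeeze li dim out) := by
  unfold Spec_squeeze; infer_instance

-- ===== CLAIM (what is proved, stated in full; the proofs are below) =====
def Claim_equal_squeeze : Prop := ∀ (li : List Int) (dim : Int), Dom_squeeze li dim → Pre_squeeze li dim → Spec_squeeze li dim (squeeze li dim)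

-- ===== LEMMAS AND PROOFS =====

-- prefix of the loop: appending li[i] for i in range(0, b) is take b
lemma map_pyGetD_take (xs : List Int) (b : Nat) (hb : b ≤ xs.length) :
    (PySem.List.pyRange 0 (b : Int) 1).map (fun i => PySem.List.pyGetD xs i 0) = xs.take b := by
  apply List.ext_getElem
  · simp [PySem.List.length_pyRange_one]; omega
  · intro k h1 h2
    have hk : k < b := by
      simpa [PySem.List.length_pyRange_one] using h1
    have hkx : k < xs.length := lt_of_lt_of_le hk hb
    simp [PySem.List.getElem_pyRange_one, PySem.List.pyGetD_natCast, List.getD,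
      List.getElem?_eq_getElem hkx]

theorem squeeze_eq_alt (li : List Int) (dim : Int) (hpre : Pre_squeeze li dim) :
    squeeze li dim = squeeze_alt li dim := by
  obtain ⟨h1, h2⟩ := hpre
  by_cases hnil : li = []
  · subst hnil
    simp only [List.length_nil, Nat.cast_zero] at *
    have hw : maybeWrapDim dim 0 = 0 := by
      simp only [maybeWrapDim]
      split_ifs with hd <;> omega
    simp [squeeze, squeeze_alt, hw, PySem.List.pyRange_one_eq_nil (le_refl 0),
      PySem.List.slice_none_none, PySem.List.pyGetD]
  · -- nonempty list: the wrapped dim w satisfies 0 ≤ w < len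
    have hlen : 0 < li.length := List.length_pos_iff.mpr hnil
    have hmax : max (li.length : Int) 1 = (li.length : Int) := by
      simp; omega
    rw [hmax] at h1 h2
    set w : Int := maybeWrapDim dim (li.length : Int) with hwdef
    have hw0 : 0 ≤ w ∧ w < (li.length : Int) := by
      rw [hwdef]; simp only [maybeWrapDim]
      split_ifs with ha hb <;> omega
    obtain ⟨hw0l, hw0r⟩ := hw0
    set k : Nat := w.toNat with hkdef
    have hkw : (k : Int) = w := Int.toNat_of_nonneg hw0l
    have hkn : k < li.length := by omega
    have hget : PySem.List.pyGetD li w 0 = li[k]'hkn :=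
      PySem.List.pyGetD_eq_getElem li 0 hw0l hw0r
    show (PySem.List.pyRange 0 (li.length : Int) 1).foldl _ [] = _
    rw [PySem.List.pyRange_one_append 0 w (li.length : Int) hw0l (le_of_lt hw0r),
      PySem.List.pyRange_one_append w (w + 1) (li.length : Int) (by omega) (by omega),
      List.foldl_append, List.foldl_append]
    -- prefix segment: i < w, so i == w is false
    have hpre1 : (PySem.List.pyRange 0 w 1).foldl
        (fun out i =>
          if i == w then
            if PySem.List.pyGetD li i 0 ≠ 1 then out ++ [PySem.List.pyGetD li i 0] else out
          else out ++ [PySem.List.pyGetD li i 0]) [] = li.take k := by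
      rw [PySem.List.foldl_congr_mem _ _
        (fun out i => out ++ [PySem.List.pyGetD li i 0]) _
        (fun acc x hx => by
          have := (PySem.List.mem_pyRange_one.mp hx).2
          simp only [show (x == w) = false by simp; omega, Bool.false_eq_true, if_false]),
        PySem.List.foldl_append_singleton_eq_map, List.nil_append, ← hkw,
        map_pyGetD_take li k hkn.le]
    rw [hpre1]
    -- middle segment: the single index w
    rw [PySem.List.pyRange_one_singleton, List.foldl_cons, List.foldl_nil]
    rw [← hwdef]
    simp only [beq_self_eq_true, if_true]
    -- suffix segment: i > w, so i == w is false
    have hpost : ∀ (init : List Int), (PySem.List.pyRange (w + 1) (li.length : Int) 1).foldl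
        (fun out i =>
          if i == w then
            if PySem.List.pyGetD li i 0 ≠ 1 then out ++ [PySem.List.pyGetD li i 0] else out
          else out ++ [PySem.List.pyGetD li i 0]) init = init ++ li.drop (k + 1) := by
      intro init
      rw [PySem.List.foldl_congr_mem _ _
        (fun out i => out ++ [PySem.List.pyGetD li i 0]) _
        (fun acc x hx => by
          have := (PySem.List.mem_pyRange_one.mp hx).1
          simp only [show (x == w) = false by simp; omega, Bool.false_eq_true, if_false]),
        PySem.List.foldl_append_singleton_eq_map]
      have hmap := PySem.List.map_pyGetD_pyRange li 0 (a := w + 1) (by omega)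
      simp only [PySem.List.len] at hmap
      rw [hmap]
      congr 2
      omega
    -- B's slices in terms of take/drop
    have hB1 : PySem.List.slice li none (some w) = li.take k := by
      rw [PySem.List.slice_to li hw0l]
    have hB2 : PySem.List.slice li (some (w + 1)) none = li.drop (k + 1) := by
      rw [PySem.List.slice_from li (a := w + 1) (by omega)]
      congr 1; omega
    by_cases h1v : li[k]'hkn = 1
    · -- li[w] = 1: A drops it, B returns the two slices
      rw [hpost]
      simp only [hget, h1v, ne_eq, not_true_eq_false, if_false]
      rw [squeeze_alt]
      simp only [← hwdef]
      rw [if_pos ⟨hw0r, by rw [hget, h1v]⟩, hB1, hB2]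
    · -- li[w] ≠ 1: A keeps everything, B copies li
      rw [hpost]
      simp only [hget, ne_eq, h1v, not_false_eq_true, if_true]
      rw [squeeze_alt]
      simp only [← hwdef]
      rw [if_neg (by rintro ⟨-, hc⟩; exact h1v (by rw [← hget, hc])),
        PySem.List.slice_none_none]
      have : li.take k ++ li[k]'hkn :: li.drop (k + 1) = li := by
        conv_rhs => rw [← List.take_append_drop k li]
        rw [List.drop_eq_getElem_cons hkn]
      simp only [List.append_assoc, List.singleton_append]
      exact this

-- ===== VERDICT (by name: the statement is the Claim_ definition above) =====
theorem squeeze_spec : Claim_equal_squeeze := by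
  intro li dim _ hpre
  exact squeeze_eq_alt li dim hpre
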